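-- pv_equiv track=rewrite | github.com/alberto-escobar/AoC2025 | Day10/main.py | bfs
-- ===== SOURCE A (Python) =====
-- from collections import deque
--
-- def bfs(target, buttons):
--     queue = deque()
--     for button in buttons:
--         queue.append((button, 1))
--     while queue:
--         current, steps = queue.popleft()
--         if current == target:
--             return steps
--         for button in buttons:
--             queue.append((current^button, steps+1))
-- ===== SOURCE B (Python) =====
-- def bfs(target, buttons):
--     # BFS over XOR states with a visited set: each distinct state is expanded
--     # at most once, instead of A's exponential queue of all button sequences.
--     visited = set()
--     frontier = set(buttons)
--     steps = 1
--     while frontier: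
--         if target in frontier:
--             return steps
--         visited |= frontier
--         frontier = {x ^ b for x in frontier for b in buttons} - visited
--         steps += 1
-- ===== Notes on version B (the rewrite author's own statement) =====
-- stated objective: faster
-- what changed: A floods a deque with one entry per button sequence (no deduplication), exploring b^steps entries; B does level-by-level BFS over distinct XOR states with a visited set, so each reachable state is expanded at most once. Intended as faster; a timing run measured 16.4x at n=256 and 283.7x at the largest size where A finished, but could not confirm 'faster' under its consistency rule.
-- outside the precondition, e.g. on bfs(1, []): A returns None, B returns None; on bfs(5, [1, 2]): A does not finish within the time limit, B returns None
import Mathlib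
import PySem

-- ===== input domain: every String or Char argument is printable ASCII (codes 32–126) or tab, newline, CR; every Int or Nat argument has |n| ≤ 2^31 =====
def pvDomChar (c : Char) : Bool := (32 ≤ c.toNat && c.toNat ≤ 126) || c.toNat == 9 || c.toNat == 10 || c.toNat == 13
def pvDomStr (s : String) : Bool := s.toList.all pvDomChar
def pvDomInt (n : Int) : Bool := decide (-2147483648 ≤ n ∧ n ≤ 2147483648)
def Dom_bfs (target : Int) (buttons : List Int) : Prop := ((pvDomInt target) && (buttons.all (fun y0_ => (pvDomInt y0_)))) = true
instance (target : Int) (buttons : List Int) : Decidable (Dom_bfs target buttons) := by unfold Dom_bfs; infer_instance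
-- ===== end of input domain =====

-- B replaces A's exponential queue of all button sequences by a BFS over XOR
-- states with a visited set (each distinct state expanded at most once).
-- Both return the number of presses; equality is proved on Pre_bfs (buttons
-- nonempty and target XOR-reachable), exactly the inputs where A returns.

-- ===== PORT A =====
-- A's 'while queue' loop may run forever (target unreachable): the port gives
-- the loop a fuel budget, mySum n 1 (n+1) = n^1 + … + n^(n+2) pops, which the
-- proof shows is never exhausted on Pre_bfs; 0 stands for A's missing return.
def mySum (n : Nat) : Nat → Nat → Nat
  | d0, 0 => n ^ d0
  | d0, j + 1 => n ^ d0 + mySum n (d0 + 1) j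

def bfsLoop (target : Int) (buttons : List Int) : Nat → List (Int × Int) → Int
  | 0, _ => 0
  | _ + 1, [] => 0
  | fuel + 1, (current, steps) :: rest =>
    if current = target then steps
    else bfsLoop target buttons fuel
      (rest ++ buttons.map (fun b => (PySem.Int.bxor current b, steps + 1)))

def bfs (target : Int) (buttons : List Int) : Int :=
  bfsLoop target buttons (mySum buttons.length 1 (buttons.length + 1))
    (buttons.map (fun b => (b, (1 : Int))))

-- ===== PORT B =====
def bfsAltLoop (target : Int) (buttons : List Int) :
    Nat → PySem.Set Int → PySem.Set Int → Int → Int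
  | 0, _, _, _ => 0
  | fuel + 1, visited, frontier, steps =>
    if frontier.isEmpty then 0
    else if PySem.Set.contains frontier target then steps
    else
      let visited' := PySem.Set.union visited frontier
      let frontier' := PySem.Set.diff
        (PySem.Set.ofList (frontier.flatMap (fun x => buttons.map (fun b => PySem.Int.bxor x b))))
        visited'
      bfsAltLoop target buttons fuel visited' frontier' (steps + 1)

-- B's while loop runs at most (number of buttons + 2) rounds on Pre_bfs (the
-- proof shows the answer is found by then); the fuel budget covers that.
def bfs_alt (target : Int) (buttons : List Int) : Int :=
  bfsAltLoop target buttons (buttons.length + 3) PySem.Set.empty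
    (PySem.Set.ofList buttons) 1

-- ===== PRECONDITION & SPEC =====
-- XOR values of all subsets of L (with duplicates); membership = XOR-reachability.
def subXors : List Int → List Int
  | [] => [(0 : Int)]
  | b :: bs => subXors bs ++ (subXors bs).map (fun y => PySem.Int.bxor y b)

-- Pre_bfs excludes exactly the inputs on which A never returns an int: with
-- buttons = [] A falls off the loop (None), and with target outside the XOR
-- span of the buttons A's queue loop runs forever.
def Pre_bfs (target : Int) (buttons : List Int) : Prop :=
  buttons ≠ [] ∧ target ∈ subXors buttons
instance (target : Int) (buttons : List Int) : Decidable (Pre_bfs target buttons) := by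
  unfold Pre_bfs; infer_instance

def pvWitness_bfs : Int × List Int := (3, [1, 2])

def Spec_bfs (target : Int) (buttons : List Int) (out : Int) : Prop := out = bfs_alt target buttons
instance (target : Int) (buttons : List Int) (out : Int) : Decidable (Spec_bfs target buttons out) := by unfold Spec_bfs; infer_instance

-- ===== CLAIM (what is proved, stated in full; the proofs are below) =====
def Claim_equal_bfs : Prop := ∀ (target : Int) (buttons : List Int), Dom_bfs target buttons → Pre_bfs target buttons → Spec_bfs target buttons (bfs target buttons)

-- ===== LEMMAS AND PROOFS =====

-- multiset of XOR values of all length-d sequences of buttons (level d of A's BFS)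
def seqs (buttons : List Int) : Nat → List Int
  | 0 => [(0 : Int)]
  | d + 1 => (seqs buttons d).flatMap (fun x => buttons.map (fun b => PySem.Int.bxor x b))

lemma seqs_one (buttons : List Int) : seqs buttons 1 = buttons := by
  simp [seqs, PySem.Int.bxor_comm]

lemma mem_seqs_succ {buttons : List Int} {x b : Int} {d : Nat}
    (hx : x ∈ seqs buttons d) (hb : b ∈ buttons) :
    PySem.Int.bxor x b ∈ seqs buttons (d + 1) := by
  simp only [seqs, List.mem_flatMap, List.mem_map]
  exact ⟨x, hx, b, hb, rfl⟩

lemma length_seqs (buttons : List Int) (d : Nat) :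
    (seqs buttons d).length = buttons.length ^ d := by
  induction d with
  | zero => simp [seqs]
  | succ d ih =>
    simp [seqs, List.length_flatMap, ih, List.map_const', List.sum_replicate,
      pow_succ, Nat.mul_comm]

lemma seqs_mono {L L' : List Int} (h : ∀ b ∈ L', b ∈ L) :
    ∀ d x, x ∈ seqs L' d → x ∈ seqs L d := by
  intro d
  induction d with
  | zero => intro x hx; simpa [seqs] using hx
  | succ d ih =>
    intro x hx
    simp only [seqs, List.mem_flatMap, List.mem_map] at hx ⊢
    obtain ⟨y, hy, b, hb, rfl⟩ := hx
    exact ⟨y, ih y hy, b, h b hb, rfl⟩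

lemma subXors_reach (L : List Int) :
    ∀ x ∈ subXors L, x = 0 ∨ ∃ d, 1 ≤ d ∧ d ≤ L.length ∧ x ∈ seqs L d := by
  induction L with
  | nil => intro x hx; left; simpa [subXors] using hx
  | cons b bs ih =>
    intro x hx
    have hsub : ∀ c ∈ bs, c ∈ b :: bs := fun c hc => List.mem_cons_of_mem _ hc
    simp only [subXors, List.mem_append, List.mem_map] at hx
    rcases hx with hx | ⟨y, hy, rfl⟩
    · rcases ih x hx with h0 | ⟨d, h1, h2, h3⟩
      · exact Or.inl h0
      · exact Or.inr ⟨d, h1, by simpa using Nat.le_succ_of_le h2, seqs_mono hsub d x h3⟩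
    · rcases ih y hy with h0 | ⟨d, h1, h2, h3⟩
      · subst h0
        right
        refine ⟨1, le_refl _, by simp, ?_⟩
        rw [seqs_one]
        simp [PySem.Int.bxor_comm]
      · right
        refine ⟨d + 1, by omega, by simpa using h2, ?_⟩
        exact mem_seqs_succ (seqs_mono hsub d y h3) (List.mem_cons_self)

lemma pre_exists {target : Int} {buttons : List Int} (hpre : Pre_bfs target buttons) :
    ∃ d, (1 ≤ d ∧ target ∈ seqs buttons d) ∧ d ≤ buttons.length + 2 := by
  obtain ⟨hne, hmem⟩ := hpre
  rcases subXors_reach buttons target hmem with h0 | ⟨d, h1, h2, h3⟩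
  · obtain ⟨b, bs, rfl⟩ := List.exists_cons_of_ne_nil hne
    refine ⟨2, ⟨by omega, ?_⟩, by omega⟩
    have hb : b ∈ seqs (b :: bs) 1 := by rw [seqs_one]; exact List.mem_cons_self
    have := mem_seqs_succ hb (List.mem_cons_self (l := bs) (a := b))
    simpa [h0] using this
  · exact ⟨d, ⟨h1, h3⟩, by omega⟩

-- ---- A side ----

lemma consume (target : Int) (buttons : List Int) (d : Int) :
    ∀ (A : List Int) (tail : List (Int × Int)) (fuel : Nat),
      (∀ x ∈ A, x ≠ target) →
      bfsLoop target buttons (A.length + fuel) (A.map (fun x => (x, d)) ++ tail)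
        = bfsLoop target buttons fuel
            (tail ++ A.flatMap (fun x => buttons.map (fun b => (PySem.Int.bxor x b, d + 1)))) := by
  intro A
  induction A with
  | nil => intro tail fuel _; simp
  | cons x A ih =>
    intro tail fuel h
    have hx : x ≠ target := h x List.mem_cons_self
    have : (x :: A).length + fuel = (A.length + fuel) + 1 := by simp; omega
    rw [this]
    simp only [List.map_cons, List.cons_append, bfsLoop, if_neg hx]
    rw [List.append_assoc]
    rw [ih (tail ++ buttons.map fun b => (PySem.Int.bxor x b, d + 1)) fuel
      (fun y hy => h y (List.mem_cons_of_mem _ hy))]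
    simp

lemma hit (target : Int) (buttons : List Int) (d : Int) :
    ∀ (A : List Int) (tail : List (Int × Int)) (extra : Nat), target ∈ A →
      bfsLoop target buttons (A.length + extra) (A.map (fun x => (x, d)) ++ tail) = d := by
  intro A
  induction A with
  | nil => intro _ _ h; cases h
  | cons x A ih =>
    intro tail extra h
    have hlen : (x :: A).length + extra = (A.length + extra) + 1 := by simp; omega
    rw [hlen]
    simp only [List.map_cons, List.cons_append, bfsLoop]
    by_cases hx : x = target
    · simp [hx]
    · rcases List.mem_cons.mp h with h' | h'
      · exact absurd h'.symm hx
      · rw [if_neg hx, List.append_assoc]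
        exact ih _ extra h'

lemma children_eq (buttons : List Int) (e : Nat) :
    (seqs buttons e).flatMap (fun x => buttons.map (fun b => (PySem.Int.bxor x b, (e : Int) + 1)))
      = (seqs buttons (e + 1)).map (fun x => (x, ((e + 1 : Nat) : Int))) := by
  conv_rhs => rw [seqs]
  rw [List.map_flatMap]
  simp [Function.comp_def]

lemma run_from (target : Int) (buttons : List Int) :
    ∀ (j d0 : Nat), 1 ≤ d0 → target ∈ seqs buttons (d0 + j) →
      (∀ e, d0 ≤ e → e < d0 + j → target ∉ seqs buttons e) → ∀ extra,
      bfsLoop target buttons (mySum buttons.length d0 j + extra)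
        ((seqs buttons d0).map (fun x => (x, (d0 : Int)))) = ((d0 + j : Nat) : Int) := by
  intro j
  induction j with
  | zero =>
    intro d0 _ hmem _ extra
    have hlen : mySum buttons.length d0 0 = (seqs buttons d0).length := by
      simp [mySum, length_seqs]
    rw [hlen]
    have := hit target buttons (d0 : Int) (seqs buttons d0) [] extra (by simpa using hmem)
    simpa using this
  | succ j ih =>
    intro d0 hd0 hmem hmin extra
    have hnot : ∀ x ∈ seqs buttons d0, x ≠ target := by
      intro x hx hEq
      exact hmin d0 (le_refl _) (by omega) (hEq ▸ hx)
    have hfuel : mySum buttons.length d0 (j + 1) + extra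
        = (seqs buttons d0).length + (mySum buttons.length (d0 + 1) j + extra) := by
      simp [mySum, length_seqs]; omega
    rw [hfuel]
    have := consume target buttons (d0 : Int) (seqs buttons d0) []
      (mySum buttons.length (d0 + 1) j + extra) hnot
    simp only [List.append_nil, List.nil_append] at this
    rw [this, children_eq buttons d0]
    have := ih (d0 + 1) (by omega) (by rw [show d0 + 1 + j = d0 + (j + 1) by omega]; exact hmem)
      (fun e he1 he2 => hmin e (by omega) (by omega)) extra
    rw [this]
    congr 1
    omega

lemma mySum_le (n : Nat) : ∀ (j' j d0 : Nat), j ≤ j' → mySum n d0 j ≤ mySum n d0 j' := by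
  intro j'
  induction j' with
  | zero => intro j d0 h; cases Nat.le_zero.mp h; exact le_refl _
  | succ j' ih =>
    intro j d0 h
    cases j with
    | zero => simp only [mySum]; omega
    | succ j =>
      simp only [mySum]
      have := ih j (d0 + 1) (by omega)
      omega

lemma A_correct (target : Int) (buttons : List Int) (d : Nat)
    (h1 : 1 ≤ d) (hmem : target ∈ seqs buttons d)
    (hmin : ∀ e, 1 ≤ e → e < d → target ∉ seqs buttons e)
    (hbound : d ≤ buttons.length + 2) :
    bfs target buttons = (d : Int) := by
  have hle : mySum buttons.length 1 (d - 1) ≤ mySum buttons.length 1 (buttons.length + 1) :=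
    mySum_le _ _ _ _ (by omega)
  have hfuel : mySum buttons.length 1 (buttons.length + 1)
      = mySum buttons.length 1 (d - 1) + (mySum buttons.length 1 (buttons.length + 1) - mySum buttons.length 1 (d - 1)) := by omega
  have hrun := run_from target buttons (d - 1) 1 (le_refl _)
    (by rw [show 1 + (d - 1) = d by omega]; exact hmem)
    (fun e he1 he2 => hmin e he1 (by omega))
    (mySum buttons.length 1 (buttons.length + 1) - mySum buttons.length 1 (d - 1))
  rw [show 1 + (d - 1) = d by omega] at hrun
  unfold bfs
  rw [hfuel]
  have hq : buttons.map (fun b => (b, (1 : Int)))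
      = (seqs buttons 1).map (fun x => (x, ((1 : Nat) : Int))) := by
    rw [seqs_one]; norm_num
  rw [hq]
  exact hrun

-- ---- B side ----

lemma absorb (buttons : List Int) (e : Nat)
    (h : ∀ x ∈ seqs buttons e, ∃ e', 1 ≤ e' ∧ e' < e ∧ x ∈ seqs buttons e') :
    ∀ k x, x ∈ seqs buttons (e + k) → ∃ e', 1 ≤ e' ∧ e' < e ∧ x ∈ seqs buttons e' := by
  intro k
  induction k with
  | zero => intro x hx; exact h x hx
  | succ k ih =>
    intro x hx
    rw [show e + (k + 1) = (e + k) + 1 by omega] at hx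
    simp only [seqs, List.mem_flatMap, List.mem_map] at hx
    obtain ⟨y, hy, b, hb, rfl⟩ := hx
    obtain ⟨e', he1, he2, hy'⟩ := ih y hy
    have hx' := mem_seqs_succ hy' hb
    by_cases hcase : e' + 1 = e
    · exact h _ (hcase ▸ hx')
    · exact ⟨e' + 1, by omega, by omega, hx'⟩

lemma B_run (target : Int) (buttons : List Int) (d : Nat)
    (hmem : target ∈ seqs buttons d)
    (hmin : ∀ e, 1 ≤ e → e < d → target ∉ seqs buttons e) :
    ∀ (j e : Nat) (V F : PySem.Set Int) (extra : Nat), 1 ≤ e → e + j = d →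
      (∀ x, x ∈ V ↔ ∃ e', 1 ≤ e' ∧ e' < e ∧ x ∈ seqs buttons e') →
      (∀ x, x ∈ F ↔ (x ∈ seqs buttons e ∧ ¬ ∃ e', 1 ≤ e' ∧ e' < e ∧ x ∈ seqs buttons e')) →
      bfsAltLoop target buttons (j + 1 + extra) V F (e : Int) = (d : Int) := by
  intro j
  induction j with
  | zero =>
    intro e V F extra he1 hed hV hF
    have hd : e = d := by omega
    subst hd
    have htF : target ∈ F := (hF target).mpr ⟨hmem, by rintro ⟨e', h1, h2, h3⟩; exact hmin e' h1 h2 h3⟩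
    have hFne : F.isEmpty = false := by
      rw [List.isEmpty_eq_false_iff_exists_mem]; exact ⟨target, htF⟩
    rw [show 0 + 1 + extra = extra + 1 by omega]
    simp only [bfsAltLoop, hFne, Bool.false_eq_true, if_false]
    rw [if_pos ((PySem.Set.contains_iff _ _).mpr htF)]
  | succ j ih =>
    intro e V F extra he1 hed hV hF
    have hlt : e < d := by omega
    have htF : target ∉ F := by
      intro hF'
      exact hmin e he1 hlt ((hF target).mp hF').1
    have hFne : F.isEmpty = false := by
      rw [List.isEmpty_eq_false_iff_exists_mem]
      by_contra h
      push Not at h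
      have habs : ∀ x ∈ seqs buttons e, ∃ e', 1 ≤ e' ∧ e' < e ∧ x ∈ seqs buttons e' := by
        intro x hx
        by_contra hx'
        exact h x ((hF x).mpr ⟨hx, hx'⟩)
      obtain ⟨e', h1, h2, h3⟩ := absorb buttons e habs (d - e) target
        (by rw [show e + (d - e) = d by omega]; exact hmem)
      exact hmin e' h1 (by omega) h3
    rw [show j + 1 + 1 + extra = (j + 1 + extra) + 1 by omega]
    simp only [bfsAltLoop, hFne, Bool.false_eq_true, if_false]
    rw [if_neg (fun hc => htF ((PySem.Set.contains_iff _ _).mp hc))]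
    have hV' : ∀ x, x ∈ PySem.Set.union V F ↔ ∃ e', 1 ≤ e' ∧ e' < e + 1 ∧ x ∈ seqs buttons e' := by
      intro x
      rw [PySem.Set.mem_union, hV, hF]
      constructor
      · rintro (⟨e', h1, h2, h3⟩ | ⟨hx, _⟩)
        · exact ⟨e', h1, by omega, h3⟩
        · exact ⟨e, he1, by omega, hx⟩
      · rintro ⟨e', h1, h2, h3⟩
        by_cases hc : e' < e
        · exact Or.inl ⟨e', h1, hc, h3⟩
        · have : e' = e := by omega
          subst this
          by_cases hv : ∃ e'', 1 ≤ e'' ∧ e'' < e' ∧ x ∈ seqs buttons e''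
          · exact Or.inl hv
          · exact Or.inr ⟨h3, hv⟩
    have hF' : ∀ x, x ∈ PySem.Set.diff
        (PySem.Set.ofList (F.flatMap (fun y => buttons.map (fun b => PySem.Int.bxor y b))))
        (PySem.Set.union V F)
        ↔ (x ∈ seqs buttons (e + 1) ∧ ¬ ∃ e', 1 ≤ e' ∧ e' < e + 1 ∧ x ∈ seqs buttons e') := by
      intro x
      rw [PySem.Set.mem_diff, PySem.Set.mem_ofList, hV' x]
      constructor
      · rintro ⟨hin, hnot⟩
        simp only [List.mem_flatMap, List.mem_map] at hin
        obtain ⟨y, hy, b, hb, rfl⟩ := hin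
        exact ⟨mem_seqs_succ ((hF y).mp hy).1 hb, hnot⟩
      · rintro ⟨hin, hnot⟩
        refine ⟨?_, hnot⟩
        simp only [seqs, List.mem_flatMap, List.mem_map] at hin
        obtain ⟨y, hy, b, hb, rfl⟩ := hin
        simp only [List.mem_flatMap, List.mem_map]
        refine ⟨y, (hF y).mpr ⟨hy, ?_⟩, b, hb, rfl⟩
        rintro ⟨e', h1, h2, h3⟩
        exact hnot ⟨e' + 1, by omega, by omega, mem_seqs_succ h3 hb⟩
    have := ih (e + 1) _ _ extra (by omega) (by omega) hV' hF'
    rw [show ((e : Int) + 1) = ((e + 1 : Nat) : Int) by push_cast; ring]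
    exact this

lemma B_correct (target : Int) (buttons : List Int) (d : Nat)
    (h1 : 1 ≤ d) (hmem : target ∈ seqs buttons d)
    (hmin : ∀ e, 1 ≤ e → e < d → target ∉ seqs buttons e)
    (hbound : d ≤ buttons.length + 2) :
    bfs_alt target buttons = (d : Int) := by
  have hV : ∀ x, x ∈ (PySem.Set.empty : PySem.Set Int) ↔
      ∃ e', 1 ≤ e' ∧ e' < 1 ∧ x ∈ seqs buttons e' := by
    intro x
    constructor
    · intro h; cases h
    · rintro ⟨e', he1, he2, _⟩; omega
  have hF : ∀ x, x ∈ PySem.Set.ofList buttons ↔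
      (x ∈ seqs buttons 1 ∧ ¬ ∃ e', 1 ≤ e' ∧ e' < 1 ∧ x ∈ seqs buttons e') := by
    intro x
    rw [PySem.Set.mem_ofList, seqs_one]
    constructor
    · intro h; exact ⟨h, by rintro ⟨e', he1, he2, _⟩; omega⟩
    · exact fun h => h.1
  have := B_run target buttons d hmem hmin (d - 1) 1 PySem.Set.empty
    (PySem.Set.ofList buttons) (buttons.length + 3 - d) (le_refl _) (by omega) hV hF
  unfold bfs_alt
  rw [show buttons.length + 3 = (d - 1) + 1 + (buttons.length + 3 - d) by omega]
  simpa using this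

-- ===== VERDICT (by name: the statement is the Claim_ definition above) =====
theorem bfs_spec : Claim_equal_bfs := by
  intro target buttons _ hpre
  unfold Spec_bfs
  obtain ⟨d, hPd, hbound⟩ := pre_exists hpre
  classical
  have hex : ∃ d, 1 ≤ d ∧ target ∈ seqs buttons d := ⟨d, hPd⟩
  set dm := Nat.find hex with hdm
  have hPdm : 1 ≤ dm ∧ target ∈ seqs buttons dm := Nat.find_spec hex
  have hminle : dm ≤ d := Nat.find_min' hex hPd
  have hmin : ∀ e, 1 ≤ e → e < dm → target ∉ seqs buttons e := by
    intro e he1 he2 hmem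
    exact Nat.find_min hex he2 ⟨he1, hmem⟩
  rw [A_correct target buttons dm hPdm.1 hPdm.2 hmin (by omega),
    B_correct target buttons dm hPdm.1 hPdm.2 hmin (by omega)]
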